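-- pv_equiv track=rewrite | github.com/jiss02/Algorithm | 프로그래머스_기능개발.py | solution
-- ===== SOURCE A (Python) =====
-- import math
--
-- def solution(p, s):
--     ans = []
--     stack = []
--     a = 0
--     for i, j in zip(p,s):
--         how = 100 - i
--         ap = math.ceil(how/j)
--         stack.append(ap)
--
--     for i in range(0,len(stack)):
--         a += 1
--         if i == len(stack) - 1:
--             ans.append(a)
--             break
--         if stack[i] < stack[i+1]:
--             ans.append(a)
--             a = 0
--         else:
--             continue
--     return ans
-- ===== SOURCE B (Python) =====
-- import math
--
-- def solution(p, s):
--     days = [math.ceil((100 - x) / y) for x, y in zip(p, s)]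
--     if not days:
--         return []
--     bounds = [i for i in range(len(days) - 1) if days[i] < days[i + 1]]
--     bounds.append(len(days) - 1)
--     out = []
--     prev = -1
--     for b in bounds:
--         out.append(b - prev)
--         prev = b
--     return out
-- ===== Notes on version B (the rewrite author's own statement) =====
-- stated objective: alternative
-- what changed: Replaces A's single index loop with an inline running counter (and a mid-loop break) by a two-phase decomposition: compute the list of group-boundary indices (positions where days[i] < days[i+1], plus the last index), then emit segment sizes as differences of consecutive boundaries.
import Mathlib
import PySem

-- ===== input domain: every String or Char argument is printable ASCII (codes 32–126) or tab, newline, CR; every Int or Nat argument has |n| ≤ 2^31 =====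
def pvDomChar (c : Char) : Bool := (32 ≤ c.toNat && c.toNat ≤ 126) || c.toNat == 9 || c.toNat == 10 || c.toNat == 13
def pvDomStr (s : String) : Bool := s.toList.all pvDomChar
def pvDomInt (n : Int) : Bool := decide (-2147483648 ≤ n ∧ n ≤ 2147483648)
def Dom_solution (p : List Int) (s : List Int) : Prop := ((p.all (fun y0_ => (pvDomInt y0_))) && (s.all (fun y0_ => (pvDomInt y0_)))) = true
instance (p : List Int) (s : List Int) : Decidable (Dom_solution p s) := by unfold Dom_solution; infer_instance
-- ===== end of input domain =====

-- B differs from A only in structure: boundary indices + consecutive differences instead of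
-- A's inline running counter; return values agree on all of Pre_.

-- ===== PORT A =====
-- math.ceil(how/j): exact integer ceiling -((-how) // j); exact on Dom (|operands| < 2^32, so
-- the float quotient never rounds across or onto an integer).
def pvCeil (a b : Int) : Int := -(PySem.Int.floordiv (-a) b)

-- A's second loop: for i in range(0, len(stack)) with its early break at the last index.
def pvLoopA (st : List Int) (i : Nat) (ans : List Int) (a : Int) : List Int :=
  if i < st.length then
    let a' := a + 1
    if i = st.length - 1 then ans ++ [a']
    else if st.getD i 0 < st.getD (i + 1) 0 then pvLoopA st (i + 1) (ans ++ [a']) 0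
    else pvLoopA st (i + 1) ans a'
  else ans
termination_by st.length - i

def solution (p : List Int) (s : List Int) : List Int :=
  let stack := (p.zip s).foldl (fun st ij => st ++ [pvCeil (100 - ij.1) ij.2]) []
  pvLoopA stack 0 [] 0

-- ===== PORT B =====
def solution_alt (p : List Int) (s : List Int) : List Int :=
  let days := (p.zip s).map (fun ij => pvCeil (100 - ij.1) ij.2)
  if days.isEmpty then []
  else
    let bounds := ((List.range (days.length - 1)).filter
        (fun i => days.getD i 0 < days.getD (i + 1) 0)) ++ [days.length - 1]
    (bounds.foldl (fun (st : List Int × Int) (b : Nat) => (st.1 ++ [(b : Int) - st.2], (b : Int))) ([], -1)).1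

-- ===== PRECONDITION & SPEC =====
-- Pre_ excludes exactly the inputs where some zipped speed is 0: there A raises ZeroDivisionError.
def Pre_solution (p : List Int) (s : List Int) : Prop := ∀ ij ∈ p.zip s, ij.2 ≠ 0
instance (p : List Int) (s : List Int) : Decidable (Pre_solution p s) := by unfold Pre_solution; infer_instance
def pvWitness_solution : List Int × List Int := ([93, 30, 55], [1, 30, 5])
def Spec_solution (p : List Int) (s : List Int) (out : List Int) : Prop := out = solution_alt p s
instance (p : List Int) (s : List Int) (out : List Int) : Decidable (Spec_solution p s out) := by unfold Spec_solution; infer_instance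

-- ===== CLAIM (what is proved, stated in full; the proofs are below) =====
def Claim_equal_solution : Prop := ∀ (p : List Int) (s : List Int), Dom_solution p s → Pre_solution p s → Spec_solution p s (solution p s)

-- ===== LEMMAS AND PROOFS =====

-- reference grouping function both sides are reduced to
def pvGrp : List Int → Int → List Int
  | [], _ => []
  | [_], a => [a + 1]
  | x :: y :: t, a => if x < y then (a + 1) :: pvGrp (y :: t) 0 else pvGrp (y :: t) (a + 1)

-- A's stack-building fold is a map
theorem pvFoldMap (f : Int × Int → Int) (l : List (Int × Int)) (acc : List Int) :
    l.foldl (fun st ij => st ++ [f ij]) acc = acc ++ l.map f := by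
  induction l generalizing acc with
  | nil => simp
  | cons h t ih => simp [List.foldl, ih, List.append_assoc]

theorem pvLoopA_eq_grp (st : List Int) (i : Nat) (ans : List Int) (a : Int)
    (h : i < st.length) : pvLoopA st i ans a = ans ++ pvGrp (st.drop i) a := by
  induction hn : st.length - i using Nat.strong_induction_on generalizing i ans a with
  | _ n ih =>
  rw [pvLoopA, if_pos h]
  have hget : st.drop i = st.getD i 0 :: st.drop (i + 1) := by
    rw [List.getD_eq_getElem?_getD, List.getElem?_eq_getElem h]
    simpa using (List.getElem_cons_drop (l := st) (i := i) h).symm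
  by_cases hlast : i = st.length - 1
  · have hd1 : st.drop (i + 1) = [] := by
      apply List.drop_eq_nil_of_le; omega
    simp only [if_pos hlast, hget, hd1, pvGrp]
  · have hi1 : i + 1 < st.length := by omega
    have hget2 : st.drop (i + 1) = st.getD (i + 1) 0 :: st.drop (i + 2) := by
      rw [List.getD_eq_getElem?_getD, List.getElem?_eq_getElem hi1]
      simpa using (List.getElem_cons_drop (l := st) (i := i + 1) hi1).symm
    rw [if_neg hlast]
    by_cases hlt : st.getD i 0 < st.getD (i + 1) 0
    · rw [if_pos hlt, ih (st.length - (i + 1)) (by omega) (i + 1) _ _ hi1 rfl]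
      rw [hget, hget2, pvGrp]
      rw [if_pos (by rw [List.getD_eq_getElem?_getD, List.getD_eq_getElem?_getD] at hlt; exact hlt)]
      simp [List.append_assoc]
    · rw [if_neg hlt, ih (st.length - (i + 1)) (by omega) (i + 1) _ _ hi1 rfl]
      rw [hget, hget2, pvGrp]
      rw [if_neg (by rw [List.getD_eq_getElem?_getD, List.getD_eq_getElem?_getD] at hlt; exact hlt)]

-- boundary indices of d (positions i with d[i] < d[i+1], plus the final index)
def pvFull (d : List Int) : List Nat :=
  ((List.range (d.length - 1)).filter (fun i => d.getD i 0 < d.getD (i + 1) 0)) ++ [d.length - 1]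

theorem pvFull_cons (x y : Int) (t : List Int) :
    pvFull (x :: y :: t) = if x < y then 0 :: (pvFull (y :: t)).map (· + 1)
                           else (pvFull (y :: t)).map (· + 1) := by
  have hflt : (((List.range ((y :: t).length - 1)).map (· + 1)).filter
      (fun i => decide ((x :: y :: t).getD i 0 < (x :: y :: t).getD (i + 1) 0)))
      = ((List.range ((y :: t).length - 1)).filter
          (fun i => decide ((y :: t).getD i 0 < (y :: t).getD (i + 1) 0))).map (· + 1) := by
    rw [List.filter_map]
    exact congrArg _ (List.filter_congr (fun i _ => by rfl))
  have hlen : (x :: y :: t).length - 1 = (y :: t).length - 1 + 1 := by simp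
  unfold pvFull
  rw [hlen, List.range_succ_eq_map, List.filter_cons]
  rw [hflt]
  by_cases hxy : x < y
  · rw [if_pos (by simpa using hxy)]
    simp [hxy]
  · rw [if_neg (by simpa using hxy)]
    simp [hxy]

-- the consecutive-difference recursion
def pvDiffs : List Nat → Int → List Int
  | [], _ => []
  | b :: bs, prev => ((b : Int) - prev) :: pvDiffs bs (b : Int)

theorem pvFold_eq_diffs (L : List Nat) (acc : List Int) (prev : Int) :
    (L.foldl (fun (st : List Int × Int) (b : Nat) => (st.1 ++ [(b : Int) - st.2], (b : Int))) (acc, prev)).1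
      = acc ++ pvDiffs L prev := by
  induction L generalizing acc prev with
  | nil => simp [pvDiffs]
  | cons b bs ih => simp [List.foldl, ih, pvDiffs, List.append_assoc]

theorem pvDiffs_map (L : List Nat) (prev : Int) :
    pvDiffs (L.map (· + 1)) prev = pvDiffs L (prev - 1) := by
  induction L generalizing prev with
  | nil => rfl
  | cons b bs ih => simp [pvDiffs, ih]; ring

theorem pvDiffs_full_eq_grp (d : List Int) (hd : d ≠ []) (prev : Int) :
    pvDiffs (pvFull d) prev = pvGrp d (-1 - prev) := by
  induction d generalizing prev with
  | nil => exact absurd rfl hd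
  | cons x t ih =>
    cases t with
    | nil =>
      show pvDiffs ([] ++ [0]) prev = _
      simp [pvDiffs, pvGrp]; ring
    | cons y t' =>
      rw [pvFull_cons]
      by_cases hxy : x < y
      · rw [if_pos hxy, pvDiffs, pvDiffs_map, ih (by simp)]
        rw [pvGrp, if_pos hxy]
        simp only [Int.natCast_zero, List.cons.injEq]
        constructor
        · ring
        · ring_nf
      · rw [if_neg hxy, pvDiffs_map, ih (by simp)]
        rw [pvGrp, if_neg hxy]
        congr 1; ring

-- main bridge: A's index loop equals B's boundaries-and-differences pass, for any days list
theorem pvMain (d : List Int) :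
    pvLoopA d 0 [] 0 =
      (if d.isEmpty then []
       else ((((List.range (d.length - 1)).filter
                 (fun i => d.getD i 0 < d.getD (i + 1) 0)) ++ [d.length - 1]).foldl
               (fun (st : List Int × Int) (b : Nat) => (st.1 ++ [(b : Int) - st.2], (b : Int)))
               ([], -1)).1) := by
  cases d with
  | nil => simp [pvLoopA]
  | cons x t =>
    rw [if_neg (by simp)]
    rw [pvLoopA_eq_grp _ 0 [] 0 (by simp), List.drop_zero, List.nil_append]
    rw [pvFold_eq_diffs, List.nil_append]
    rw [show (((List.range ((x :: t).length - 1)).filter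
          (fun i => (x :: t).getD i 0 < (x :: t).getD (i + 1) 0)) ++ [(x :: t).length - 1])
        = pvFull (x :: t) from rfl]
    rw [pvDiffs_full_eq_grp _ (by simp) (-1)]
    norm_num

-- ===== VERDICT (by name: the statement is the Claim_ definition above) =====
theorem solution_spec : Claim_equal_solution := by
  intro p s _ _
  show solution p s = solution_alt p s
  have e : solution p s
      = pvLoopA ((p.zip s).map (fun ij => pvCeil (100 - ij.1) ij.2)) 0 [] 0 := by
    show pvLoopA ((p.zip s).foldl (fun st ij => st ++ [pvCeil (100 - ij.1) ij.2]) []) 0 [] 0 = _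
    rw [pvFoldMap (fun ij => pvCeil (100 - ij.1) ij.2) (p.zip s) [], List.nil_append]
  rw [e]
  exact pvMain _
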